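-- pv_equiv track=rewrite | github.com/PreludeAndFugue/AdventOfCode | python/day09.py | _part2
-- ===== SOURCE A (Python) =====
-- def _part2(numbers, value):
--     for i, _ in enumerate(numbers):
--         for j, _ in enumerate(numbers[i + 1:], start=i + 1):
--             s = sum(numbers[i:j + 1])
--             if s == value:
--                 sub = numbers[i: j + 1]
--                 return min(sub) + max(sub)
--             if s > value:
--                 break
-- ===== SOURCE B (Python) =====
-- def _part2(numbers, value):
--     n = len(numbers)
--     for i in range(n):
--         s = mn = mx = numbers[i]
--         for x in numbers[i + 1:]:
--             s += x
--             if x < mn: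
--                 mn = x
--             if x > mx:
--                 mx = x
--             if s == value:
--                 return mn + mx
--             if s > value:
--                 break
--     return None
-- ===== Notes on version B (the rewrite author's own statement) =====
-- stated objective: alternative
-- what changed: B keeps a running sum, minimum and maximum while extending each window, instead of re-summing the slice and re-scanning it for min/max at every step; worst-case cost drops, though the early break makes both fast on typical inputs.
import Mathlib
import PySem

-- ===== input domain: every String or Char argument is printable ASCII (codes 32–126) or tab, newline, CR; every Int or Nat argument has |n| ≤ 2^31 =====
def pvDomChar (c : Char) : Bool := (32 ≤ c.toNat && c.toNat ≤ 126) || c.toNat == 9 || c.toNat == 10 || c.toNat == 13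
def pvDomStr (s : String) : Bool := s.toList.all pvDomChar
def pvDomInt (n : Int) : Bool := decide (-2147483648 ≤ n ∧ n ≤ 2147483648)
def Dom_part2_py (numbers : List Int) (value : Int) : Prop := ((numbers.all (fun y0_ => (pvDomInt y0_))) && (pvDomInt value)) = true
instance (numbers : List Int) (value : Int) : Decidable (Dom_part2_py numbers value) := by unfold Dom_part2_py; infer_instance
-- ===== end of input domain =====

-- B replaces A's per-step slice re-summation and slice min/max scans by running accumulators
-- kept while each window extends (objective: alternative); return values agree on every input.


-- ===== PORT A =====
-- inner loop: 'for j, _ in enumerate(numbers[i+1:], start=i+1): …'  (none = loop ended or 'break')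
def part2PyInner (numbers : List Int) (value : Int) (i : Int) : List (Int × Int) → Option Int
  | [] => none
  | (j, _) :: rest =>
    let s := (PySem.List.slice numbers (some i) (some (j + 1))).sum
    if s = value then
      let sub := PySem.List.slice numbers (some i) (some (j + 1))
      match PySem.List.min? sub (fun x => x), PySem.List.max? sub (fun x => x) with
      | some a, some b => some (a + b)
      | _, _ => none           -- unreachable: sub is nonempty (Python min/max would raise on [])
    else if s > value then none
    else part2PyInner numbers value i rest

-- outer loop: 'for i, _ in enumerate(numbers): …'
def part2PyOuter (numbers : List Int) (value : Int) : List (Int × Int) → Option Int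
  | [] => none
  | (i, _) :: rest =>
    match part2PyInner numbers value i
        (PySem.List.enumerate (PySem.List.slice numbers (some (i + 1)) none) (i + 1)) with
    | some r => some r
    | none => part2PyOuter numbers value rest

def part2_py (numbers : List Int) (value : Int) : Option Int :=
  part2PyOuter numbers value (PySem.List.enumerate numbers 0)

-- ===== PORT B =====
-- inner loop: 'for x in numbers[i+1:]: …' with running sum/min/max  (none = loop ended or 'break')
def part2AltInner (value : Int) : Int → Int → Int → List Int → Option Int
  | _, _, _, [] => none
  | s, mn, mx, x :: xs =>
    let s' := s + x
    let mn' := if x < mn then x else mn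
    let mx' := if x > mx then x else mx
    if s' = value then some (mn' + mx')
    else if s' > value then none
    else part2AltInner value s' mn' mx' xs

-- outer loop: 'for i in range(n): s = mn = mx = numbers[i]; …' — each start index begins a suffix
def part2AltOuter (value : Int) : List Int → Option Int
  | [] => none
  | x :: xs =>
    match part2AltInner value x x x xs with
    | some r => some r
    | none => part2AltOuter value xs

def part2_py_alt (numbers : List Int) (value : Int) : Option Int :=
  part2AltOuter value numbers

-- ===== PRECONDITION & SPEC =====
def Spec_part2_py (numbers : List Int) (value : Int) (out : Option Int) : Prop := out = part2_py_alt numbers value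
instance (numbers : List Int) (value : Int) (out : Option Int) : Decidable (Spec_part2_py numbers value out) := by unfold Spec_part2_py; infer_instance

-- ===== CLAIM (what is proved, stated in full; the proofs are below) =====
def Claim_equal_part2_py : Prop := ∀ (numbers : List Int) (value : Int), Dom_part2_py numbers value → Spec_part2_py numbers value (part2_py numbers value)

-- ===== LEMMAS AND PROOFS =====

-- B's branch updates are Int min / max
theorem pv_if_lt_min (a b : Int) : (if b < a then b else a) = min a b := by
  rcases le_total a b with h | h <;> simp [h] <;> omega

theorem pv_if_gt_max (a b : Int) : (if b > a then b else a) = max a b := by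
  rcases le_total a b with h | h <;> simp [h] <;> omega

-- window extension: the slice [i, j0+1) is the slice [i, j0) with numbers[j0] appended
theorem pv_window_step (numbers : List Int) (i j0 : Nat) (y : Int) (t : List Int)
    (hd : numbers.drop j0 = y :: t) (hij : i ≤ j0) :
    (numbers.drop i).take (j0 + 1 - i) = (numbers.drop i).take (j0 - i) ++ [y] := by
  have hy : numbers[j0]? = some y := by
    have h0 : (numbers.drop j0)[0]? = numbers[j0 + 0]? := List.getElem?_drop
    rw [hd] at h0
    simpa using h0.symm
  have hyi : (numbers.drop i)[j0 - i]? = some y := by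
    have h0 : (numbers.drop i)[j0 - i]? = numbers[i + (j0 - i)]? := List.getElem?_drop
    have : i + (j0 - i) = j0 := by omega
    rw [h0, this, hy]
  have h1 : j0 + 1 - i = (j0 - i) + 1 := by omega
  rw [h1, List.take_add_one, hyi]
  rfl

-- the inner loops agree: A's slice sum / slice min / slice max over the window [i, j0) of
-- 'numbers' are exactly B's accumulators s, mn, mx, and the break conditions coincide
theorem pv_inner_eq (value : Int) (numbers : List Int) (d : List Int) :
    ∀ (j0 i : Nat) (x : Int) (rest : List Int),
    numbers.drop j0 = d → i < j0 →
    (numbers.drop i).take (j0 - i) = x :: rest →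
    part2PyInner numbers value (i : Int) (PySem.List.enumerate d (j0 : Int)) =
    part2AltInner value (x :: rest).sum (rest.foldl min x) (rest.foldl max x) d := by
  induction d with
  | nil =>
    intro j0 i x rest hd hij hw
    simp [part2PyInner, part2AltInner, PySem.List.enumerate_nil]
  | cons y t ih =>
    intro j0 i x rest hd hij hw
    rw [PySem.List.enumerate_cons]
    have hslice : PySem.List.slice numbers (some (i : Int)) (some ((j0 : Int) + 1)) =
        x :: (rest ++ [y]) := by
      have hcast : ((j0 : Int) + 1) = ((j0 + 1 : Nat) : Int) := by push_cast; ring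
      rw [hcast, PySem.List.slice_natCast]
      rw [pv_window_step numbers i j0 y t hd (by omega), hw]
      rfl
    have hdrop1 : numbers.drop (j0 + 1) = t := by
      have : numbers.drop (j0 + 1) = (numbers.drop j0).drop 1 := by
        rw [List.drop_drop]
      rw [this, hd]; rfl
    rw [part2PyInner, part2AltInner]
    simp only [hslice]
    have hsum : (x :: (rest ++ [y])).sum = (x :: rest).sum + y := by
      simp [List.sum_append]
      ring
    have hmn : (rest ++ [y]).foldl min x = (if y < rest.foldl min x then y else rest.foldl min x) := by
      rw [List.foldl_append, pv_if_lt_min]; rfl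
    have hmx : (rest ++ [y]).foldl max x = (if y > rest.foldl max x then y else rest.foldl max x) := by
      rw [List.foldl_append, pv_if_gt_max]; rfl
    rw [hsum]
    by_cases h1 : (x :: rest).sum + y = value
    · simp only [h1, if_pos rfl]
      rw [PySem.List.min?_id_cons, PySem.List.max?_id_cons, hmn, hmx]
      simp
    · rw [if_neg h1, if_neg h1]
      by_cases h2 : (x :: rest).sum + y > value
      · rw [if_pos h2, if_pos h2]
      · rw [if_neg h2, if_neg h2]
        have hcast : (j0 : Int) + 1 = ((j0 + 1 : Nat) : Int) := by push_cast; ring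
        rw [hcast]
        have hw' : (numbers.drop i).take (j0 + 1 - i) = x :: (rest ++ [y]) := by
          rw [pv_window_step numbers i j0 y t hd (by omega), hw]; rfl
        have := ih (j0 + 1) i x (rest ++ [y]) hdrop1 (by omega) hw'
        rw [this, hsum, hmn, hmx]

-- the outer loops agree on every suffix of 'numbers'
theorem pv_outer_eq (value : Int) (numbers : List Int) (d : List Int) :
    ∀ (i : Nat), numbers.drop i = d →
    part2PyOuter numbers value (PySem.List.enumerate d (i : Int)) = part2AltOuter value d := by
  induction d with
  | nil => intro i hd; simp [part2PyOuter, part2AltOuter, PySem.List.enumerate_nil]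
  | cons x t ih =>
    intro i hd
    rw [PySem.List.enumerate_cons, part2PyOuter, part2AltOuter]
    have hcast : (i : Int) + 1 = ((i + 1 : Nat) : Int) := by push_cast; ring
    have hdrop1 : numbers.drop (i + 1) = t := by
      have : numbers.drop (i + 1) = (numbers.drop i).drop 1 := by rw [List.drop_drop]
      rw [this, hd]; rfl
    have hslice : PySem.List.slice numbers (some ((i : Int) + 1)) none = t := by
      rw [hcast, PySem.List.slice_from_natCast, hdrop1]
    have hw : (numbers.drop i).take (i + 1 - i) = x :: ([] : List Int) := by
      have : i + 1 - i = 1 := by omega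
      rw [this, hd]; rfl
    have hinner := pv_inner_eq value numbers t (i + 1) i x [] hdrop1 (by omega) hw
    rw [hslice, hcast, hinner]
    simp only [List.sum_cons, List.sum_nil, List.foldl_nil, add_zero]
    rw [ih (i + 1) hdrop1]

-- ===== VERDICT (by name: the statement is the Claim_ definition above) =====
theorem part2_py_spec : Claim_equal_part2_py := by
  intro numbers value _
  unfold Spec_part2_py part2_py part2_py_alt
  have h := pv_outer_eq value numbers numbers 0 rfl
  simpa using h
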